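-- pv_equiv track=rewrite | github.com/JustKesha/multi-weather-bot-application | utils/general.py | wrap_text_block
-- ===== SOURCE A (Python) =====
-- from typing import List
--
-- def upcase_first_char(s:str) -> str:
--     return s[0].upper() + s[1:]
--
-- def wrap_text_block(
--         block_elements:List[str],
--         elements_in_row:int=2,
--         capitalize_rows:bool=True,
--         join:str=', ',
--         row_end:str=',\n',
--         end:str='.',
--         ) -> str:
--
--     result = ''
--     new_row = True
--     for i, el in enumerate(block_elements):
--
--         if new_row and capitalize_rows:
--             el = upcase_first_char(el)
--             new_row = False
--
--         result += el
--
--         if i == len(block_elements) - 1: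
--             result += end
--         elif (i + 1) % elements_in_row == 0:
--             result += row_end
--             new_row = True
--         else:
--             result += join
--
--     return result
-- ===== SOURCE B (Python) =====
-- from typing import List
--
-- def upcase_first_char(s: str) -> str:
--     return s[0].upper() + s[1:]
--
-- def wrap_text_block(
--         block_elements: List[str],
--         elements_in_row: int = 2,
--         capitalize_rows: bool = True,
--         join: str = ', ',
--         row_end: str = ',\n',
--         end: str = '.',
--         ) -> str:
--     if not block_elements:
--         return ''
--     rows = []
--     rest = block_elements
--     while rest:
--         rows.append(rest[:elements_in_row])
--         rest = rest[elements_in_row:]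
--     if capitalize_rows:
--         rows = [[upcase_first_char(row[0])] + row[1:] for row in rows]
--     return row_end.join(join.join(row) for row in rows) + end
-- ===== Notes on version B (the rewrite author's own statement) =====
-- stated objective: simpler
-- what changed: Replaces the single flat indexed pass with a new_row flag and per-index modular separator choice by a decomposition: chunk the list into rows, capitalize each row head, join each row with `join`, join rows with `row_end`, append `end`; …
-- outside the precondition, e.g. on wrap_text_block(['a'], 0, True, ',', ';', '.'): A returns 'A.', B does not finish within the time limit
import Mathlib
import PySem

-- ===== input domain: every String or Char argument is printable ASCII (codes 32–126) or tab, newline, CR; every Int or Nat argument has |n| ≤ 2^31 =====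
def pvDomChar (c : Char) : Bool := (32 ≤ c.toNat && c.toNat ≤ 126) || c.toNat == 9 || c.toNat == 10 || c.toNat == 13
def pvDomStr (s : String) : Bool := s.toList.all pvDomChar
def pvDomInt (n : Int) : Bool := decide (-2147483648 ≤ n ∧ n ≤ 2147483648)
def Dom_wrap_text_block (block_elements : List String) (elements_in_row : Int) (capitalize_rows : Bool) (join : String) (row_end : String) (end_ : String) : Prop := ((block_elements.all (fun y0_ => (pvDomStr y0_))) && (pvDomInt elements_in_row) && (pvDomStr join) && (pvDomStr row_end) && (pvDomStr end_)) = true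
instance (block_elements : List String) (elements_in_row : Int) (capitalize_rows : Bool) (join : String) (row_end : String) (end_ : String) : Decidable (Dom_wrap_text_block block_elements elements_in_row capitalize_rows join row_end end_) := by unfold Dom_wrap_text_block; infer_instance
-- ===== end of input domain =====

-- B re-implements the flat indexed pass with a new_row flag as: chunk the list into rows, cap each
-- row head, join each row with `join`, join the rows with `row_end`, append `end` (objective: simpler).
-- ===== PORT A =====
-- s[0].upper() + s[1:]  (s[0] on "" raises IndexError -> pyGet? none; excluded by Pre_)
def pvUpFirst (s : String) : String :=
  match PySem.Str.pyGet? s 0 with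
  | some c => PySem.Str.upper (String.singleton c) ++ PySem.Str.slice s (some 1) none
  | none => s

-- the body of A's for-loop, state (result, new_row), element (i, el)
def pvStepA (l : List String) (e : Int) (cap : Bool) (jn re en : String)
    (st : String × Bool) (p : Int × String) : String × Bool :=
  let el := if st.2 && cap then pvUpFirst p.2 else p.2
  let new_row := if st.2 && cap then false else st.2
  let result := st.1 ++ el
  if p.1 == (l.length : Int) - 1 then (result ++ en, new_row)
  else if PySem.Int.mod (p.1 + 1) e == 0 then (result ++ re, true)
  else (result ++ jn, new_row)

def wrap_text_block (block_elements : List String) (elements_in_row : Int) (capitalize_rows : Bool) (join : String) (row_end : String) (end_ : String) : String :=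
  ((PySem.List.enumerate block_elements).foldl
    (pvStepA block_elements elements_in_row capitalize_rows join row_end end_) ("", true)).1

-- ===== PORT B =====
-- while rest: rows.append(rest[:size]); rest = rest[size:]   (for size ≥ 1, the only widths Pre_
-- admits, rest[:size]/rest[size:] are take/drop, exact).  With size = 0 the Python loop never
-- terminates; the 'size = 0' guard only makes the recursion total (that region lies outside Pre_).
def pvChunks (size : Nat) (rows : List (List String)) (rest : List String) : List (List String) :=
  if size = 0 then rows
  else match rest with
    | [] => rows
    | x :: xs => pvChunks size (rows ++ [(x :: xs).take size]) ((x :: xs).drop size)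
termination_by rest.length
decreasing_by simp; omega

-- [upcase_first_char(row[0])] + row[1:]  (row[0] on [] raises IndexError; rows are never empty)
def pvCapHead (row : List String) : List String :=
  match PySem.List.pyGet? row 0 with
  | some h => pvUpFirst h :: PySem.List.slice row (some 1) none
  | none => row

def wrap_text_block_alt (block_elements : List String) (elements_in_row : Int) (capitalize_rows : Bool) (join : String) (row_end : String) (end_ : String) : String :=
  if block_elements = [] then ""
  else
    let size := elements_in_row.toNat
    let rows := pvChunks size [] block_elements
    let rows := if capitalize_rows then rows.map pvCapHead else rows
    PySem.Str.join row_end (rows.map (fun row => PySem.Str.join join row)) ++ end_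

-- ===== PRECONDITION & SPEC =====
-- Pre_ restricts row width to the natural domain elements_in_row ≥ 1 on nonempty input: at width 0
-- Python A raises ZeroDivisionError for lists of ≥ 2 elements, and A's values on the remaining
-- zero/negative-width inputs are accidents of Python's modulo on nonpositive divisors, where B's
-- chunking loop does not terminate; it also excludes, when capitalize_rows, an empty string at a
-- row-start position, on which both A and B raise IndexError.
def Pre_wrap_text_block (block_elements : List String) (elements_in_row : Int) (capitalize_rows : Bool) (join : String) (row_end : String) (end_ : String) : Prop :=
  (block_elements = [] ∨ 1 ≤ elements_in_row) ∧
  (capitalize_rows = true →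
    ∀ i, i < block_elements.length → elements_in_row.toNat ∣ i → block_elements.getD i "" ≠ "")
instance (block_elements : List String) (elements_in_row : Int) (capitalize_rows : Bool) (join : String) (row_end : String) (end_ : String) : Decidable (Pre_wrap_text_block block_elements elements_in_row capitalize_rows join row_end end_) := by unfold Pre_wrap_text_block; infer_instance

def pvWitness_wrap_text_block : List String × Int × Bool × String × String × String :=
  (["alpha", "beta", "gamma"], 2, true, ", ", ",\n", ".")

def Spec_wrap_text_block (block_elements : List String) (elements_in_row : Int) (capitalize_rows : Bool) (join : String) (row_end : String) (end_ : String) (out : String) : Prop := out = wrap_text_block_alt block_elements elements_in_row capitalize_rows join row_end end_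
instance (block_elements : List String) (elements_in_row : Int) (capitalize_rows : Bool) (join : String) (row_end : String) (end_ : String) (out : String) : Decidable (Spec_wrap_text_block block_elements elements_in_row capitalize_rows join row_end end_ out) := by unfold Spec_wrap_text_block; infer_instance

-- ===== CLAIM (what is proved, stated in full; the proofs are below) =====
def Claim_equal_wrap_text_block : Prop := ∀ (block_elements : List String) (elements_in_row : Int) (capitalize_rows : Bool) (join : String) (row_end : String) (end_ : String), Dom_wrap_text_block block_elements elements_in_row capitalize_rows join row_end end_ → Pre_wrap_text_block block_elements elements_in_row capitalize_rows join row_end end_ → Spec_wrap_text_block block_elements elements_in_row capitalize_rows join row_end end_ (wrap_text_block block_elements elements_in_row capitalize_rows join row_end end_)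

-- ===== LEMMAS AND PROOFS =====

theorem pvSAssoc (a b c : String) : a ++ b ++ c = a ++ (b ++ c) :=
  String.toList_injective (by simp)

theorem pvSAppendEmpty (a : String) : a ++ "" = a :=
  String.toList_injective (by simp)

theorem pvSJoinSingleton (sep a : String) : PySem.Str.join sep [a] = a :=
  String.toList_injective (by simp [PySem.Str.toList_join, PySem.Chars.join_singleton])

theorem pvSJoinConsCons (sep a b : String) (t : List String) :
    PySem.Str.join sep (a :: b :: t) = a ++ sep ++ PySem.Str.join sep (b :: t) :=
  String.toList_injective (by simp [PySem.Str.toList_join, PySem.Chars.join_cons_cons])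

-- row-capitalization as B applies it
def pvCap (cap : Bool) (row : List String) : List String :=
  if cap then pvCapHead row else row

theorem pvCapHead_cons (x : String) (ys : List String) :
    pvCapHead (x :: ys) = pvUpFirst x :: ys := by
  simp [pvCapHead, PySem.List.pyGet?_zero_cons, PySem.List.slice_from_one]

-- pure-recursion description of A's loop over the suffix starting at index i
def pvAuxA (cap : Bool) (jn re en : String) (n k : Nat) : List String → Nat → Bool → String
  | [], _, _ => ""
  | x :: xs, i, nr =>
    let el := if nr && cap then pvUpFirst x else x
    let nr' := if nr && cap then false else nr
    if i = n - 1 then el ++ en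
    else if k ∣ (i + 1) then el ++ re ++ pvAuxA cap jn re en n k xs (i + 1) true
    else el ++ jn ++ pvAuxA cap jn re en n k xs (i + 1) nr'

-- pure-recursion description of B's chunking loop
def pvRows (size : Nat) : List String → List (List String)
  | [] => []
  | x :: xs => ((x :: xs).take size) :: pvRows size (xs.drop (size - 1))
termination_by l => l.length
decreasing_by simp

theorem pvAuxA_cons (cap : Bool) (jn re en : String) (n k : Nat) (x : String) (xs : List String) (i : Nat) (nr : Bool) :
    pvAuxA cap jn re en n k (x :: xs) i nr =
      (if i = n - 1 then (if nr && cap then pvUpFirst x else x) ++ en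
       else if k ∣ (i + 1) then
         (if nr && cap then pvUpFirst x else x) ++ re ++ pvAuxA cap jn re en n k xs (i + 1) true
       else
         (if nr && cap then pvUpFirst x else x) ++ jn ++
           pvAuxA cap jn re en n k xs (i + 1) (if nr && cap then false else nr)) := by
  simp only [pvAuxA]

theorem pvChunks_eq (size : Nat) (hs : size ≠ 0) (rows : List (List String)) (rest : List String) :
    pvChunks size rows rest = rows ++ pvRows size rest := by
  induction hm : rest.length using Nat.strong_induction_on generalizing rest rows with
  | _ m IH =>
    cases rest with
    | nil => rw [pvChunks, pvRows]; simp [hs]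
    | cons x xs =>
      rw [pvChunks, pvRows]
      have hdrop : (x :: xs).drop size = xs.drop (size - 1) := by
        obtain ⟨s', rfl⟩ : ∃ s', size = s' + 1 := ⟨size - 1, by omega⟩
        simp
      have hlt : (xs.drop (size - 1)).length < m := by
        subst hm; simp
      simp only [if_neg hs, hdrop]
      rw [IH _ hlt _ _ rfl]
      simp

theorem pvFoldA (l : List String) (e : Int) (cap : Bool) (jn re en : String) (he : e ≠ 0) :
    ∀ (xs : List String) (i : Nat) (r : String) (nr : Bool), i + xs.length = l.length →
    ((PySem.List.enumerate xs (i : Int)).foldl (pvStepA l e cap jn re en) (r, nr)).1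
      = r ++ pvAuxA cap jn re en l.length e.natAbs xs i nr := by
  intro xs
  induction xs with
  | nil =>
    intro i r nr h
    rw [PySem.List.enumerate_nil]
    simp [pvAuxA, pvSAppendEmpty]
  | cons x xs ih =>
    intro i r nr h
    simp only [List.length_cons] at h
    rw [PySem.List.enumerate_cons, List.foldl_cons]
    by_cases h1 : i = l.length - 1
    · have hxs : xs = [] := by
        have hlen : xs.length = 0 := by omega
        exact List.length_eq_zero_iff.mp hlen
      subst hxs
      have hc1 : ((i : Int) == (l.length : Int) - 1) = true := by
        simp only [beq_iff_eq]; omega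
      simp only [pvStepA, hc1, if_true]
      rw [PySem.List.enumerate_nil]
      simp only [List.foldl_nil]
      simp only [pvAuxA, if_pos h1]
      simp only [pvSAssoc]
    · have hc1 : ((i : Int) == (l.length : Int) - 1) = false := by
        simp only [beq_eq_false_iff_ne]; intro hcon; apply h1; omega
      have hcast : (i : Int) + 1 = ((i + 1 : Nat) : Int) := by push_cast; ring
      have h' : (i + 1) + xs.length = l.length := by omega
      by_cases h2 : e.natAbs ∣ (i + 1)
      · have hdvd : e ∣ ((i : Int) + 1) := by
          refine Int.natAbs_dvd_natAbs.mp ?_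
          have hna : ((i : Int) + 1).natAbs = i + 1 := by omega
          rw [hna]; exact h2
        have hc2 : (PySem.Int.mod ((i : Int) + 1) e == 0) = true := by
          simp [beq_iff_eq, PySem.Int.mod_eq_zero_iff_dvd, hdvd]
        simp only [pvStepA, hc1, hc2, Bool.false_eq_true, if_false, if_true]
        rw [hcast, ih (i + 1) _ true h']
        simp only [pvAuxA, if_neg h1, if_pos h2]
        simp only [pvSAssoc]
      · have hndvd : ¬ e ∣ ((i : Int) + 1) := by
          intro hd
          have hna : ((i : Int) + 1).natAbs = i + 1 := by omega
          exact h2 (by rw [← hna]; exact Int.natAbs_dvd_natAbs.mpr hd)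
        have hc2 : (PySem.Int.mod ((i : Int) + 1) e == 0) = false := by
          simp [beq_iff_eq, PySem.Int.mod_eq_zero_iff_dvd, hndvd]
        simp only [pvStepA, hc1, hc2, Bool.false_eq_true, if_false]
        rw [hcast, ih (i + 1) _ _ h']
        simp only [pvAuxA, if_neg h1, if_neg h2]
        simp only [pvSAssoc]

theorem pvSFinal (cap : Bool) (jn re en : String) (n k : Nat) :
    ∀ (ys : List String) (i : Nat) (nr : Bool), ys ≠ [] → (nr && cap) = false →
    i + ys.length = n → (∀ t, 0 < t → t < ys.length → ¬ k ∣ (i + t)) →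
    pvAuxA cap jn re en n k ys i nr = PySem.Str.join jn ys ++ en := by
  intro ys
  induction ys with
  | nil => intro i nr hne; exact absurd rfl hne
  | cons y ys ih =>
    intro i nr hne hnc h hnd
    rw [pvAuxA_cons]
    cases ys with
    | nil =>
      have h1 : i = n - 1 := by simp at h; omega
      simp only [hnc, Bool.false_eq_true, if_false, if_pos h1]
      rw [pvSJoinSingleton]
    | cons y2 t =>
      have h1 : i ≠ n - 1 := by simp at h; omega
      have h2 : ¬ k ∣ (i + 1) := by
        have := hnd 1 one_pos (by simp); simpa using this
      simp only [hnc, Bool.false_eq_true, if_false, if_neg h1, if_neg h2]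
      rw [ih (i + 1) nr (by simp) hnc (by simp at h ⊢; omega)
        (fun t' ht0 htl => by
          intro hc
          refine hnd (t' + 1) (by omega) (by simp at htl ⊢; omega) ?_
          have heq : i + (t' + 1) = i + 1 + t' := by omega
          rw [heq]; exact hc)]
      rw [pvSJoinConsCons]
      simp only [pvSAssoc]

theorem pvSMid (cap : Bool) (jn re en : String) (n k : Nat) :
    ∀ (ys rest : List String) (i : Nat) (nr : Bool), ys ≠ [] → (nr && cap) = false →
    rest ≠ [] → k ∣ (i + ys.length) → i + ys.length + rest.length = n →
    (∀ t, 0 < t → t < ys.length → ¬ k ∣ (i + t)) →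
    pvAuxA cap jn re en n k (ys ++ rest) i nr
      = PySem.Str.join jn ys ++ re ++ pvAuxA cap jn re en n k rest (i + ys.length) true := by
  intro ys
  induction ys with
  | nil => intro rest i nr hne; exact absurd rfl hne
  | cons y ys ih =>
    intro rest i nr hne hnc hrest hdvd h hnd
    have hrl : rest.length ≠ 0 := fun h0 => hrest (List.length_eq_zero_iff.mp h0)
    rw [List.cons_append, pvAuxA_cons]
    have h1 : i ≠ n - 1 := by simp at h; omega
    cases ys with
    | nil =>
      have h2 : k ∣ (i + 1) := by simpa using hdvd
      simp only [hnc, Bool.false_eq_true, if_false, if_neg h1, if_pos h2]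
      rw [pvSJoinSingleton]
      simp only [List.nil_append, List.length_cons, List.length_nil, Nat.zero_add]
    | cons y2 t =>
      have h2 : ¬ k ∣ (i + 1) := by
        have := hnd 1 one_pos (by simp); simpa using this
      simp only [hnc, Bool.false_eq_true, if_false, if_neg h1, if_neg h2]
      rw [ih rest (i + 1) nr (by simp) hnc hrest
        (by
          have heq : i + 1 + (y2 :: t).length = i + (y :: y2 :: t).length := by simp; omega
          rw [heq]; exact hdvd)
        (by simp at h ⊢; omega)
        (fun t' ht0 htl => by
          intro hc
          refine hnd (t' + 1) (by omega) (by simp at htl ⊢; omega) ?_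
          have heq : i + (t' + 1) = i + 1 + t' := by omega
          rw [heq]; exact hc)]
      rw [pvSJoinConsCons]
      have hlen : i + 1 + (y2 :: t).length = i + (y :: y2 :: t).length := by simp; omega
      rw [hlen]
      simp only [pvSAssoc]

theorem pvRowStep (cap : Bool) (jn re en : String) (n k : Nat) :
    ∀ (row rest : List String) (i : Nat), row ≠ [] → row.length ≤ k → k ∣ i →
    i + row.length + rest.length = n → (rest ≠ [] → row.length = k) →
    pvAuxA cap jn re en n k (row ++ rest) i true
      = PySem.Str.join jn (pvCap cap row) ++
        (if rest = [] then en else re ++ pvAuxA cap jn re en n k rest (i + row.length) true) := by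
  intro row rest i hrow hlen hdvd hsum hrk
  obtain ⟨x, ys, rfl⟩ : ∃ x ys, row = x :: ys := by
    cases row with
    | nil => exact absurd rfl hrow
    | cons a b => exact ⟨a, b, rfl⟩
  rw [List.cons_append, pvAuxA_cons]
  simp only [Bool.true_and]
  have hcap : pvCap cap (x :: ys) = (if cap then pvUpFirst x else x) :: ys := by
    cases cap <;> simp [pvCap, pvCapHead_cons]
  have hnc : ((if cap then false else true) && cap) = false := by cases cap <;> simp
  cases ys with
  | nil =>
    by_cases hre : rest = []
    · subst hre
      have h1 : i = n - 1 := by simp at hsum; omega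
      simp only [if_pos h1, if_pos rfl, hcap]
      rw [pvSJoinSingleton]
      simp
    · have h1 : i ≠ n - 1 := by
        have : rest.length ≠ 0 := fun h0 => hre (List.length_eq_zero_iff.mp h0)
        simp at hsum; omega
      have hk1 : k = 1 := by have := hrk hre; simpa using this.symm
      have h2 : k ∣ (i + 1) := by rw [hk1]; exact one_dvd _
      simp only [if_neg h1, if_pos h2, if_neg hre, hcap]
      rw [pvSJoinSingleton]
      simp [pvSAssoc]
  | cons y2 t =>
    have hk2 : 2 ≤ k := by simp at hlen ⊢; omega
    have h1 : i ≠ n - 1 := by simp at hsum; omega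
    have h2 : ¬ k ∣ (i + 1) := by
      intro hc
      have hd1 : k ∣ 1 := by
        have := Nat.dvd_sub hc hdvd
        simpa using this
      have := Nat.le_of_dvd one_pos hd1
      omega
    have hnd : ∀ t', 0 < t' → t' < (y2 :: t).length → ¬ k ∣ (i + 1 + t') := by
      intro t' ht0 htl hc
      have hd : k ∣ (1 + t') := by
        have heq : i + 1 + t' - i = 1 + t' := by omega
        have := Nat.dvd_sub hc hdvd
        rwa [heq] at this
      have hle := Nat.le_of_dvd (by omega) hd
      have hlt : 1 + t' < k := by simp at htl hlen; omega
      omega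
    simp only [if_neg h1, if_neg h2]
    by_cases hre : rest = []
    · subst hre
      rw [List.append_nil]
      rw [pvSFinal cap jn re en n k (y2 :: t) (i + 1) (if cap then false else true)
        (by simp) hnc (by simp at hsum ⊢; omega) hnd]
      simp only [if_pos rfl, hcap]
      rw [pvSJoinConsCons]
      simp [pvSAssoc]
    · have hkl : (x :: y2 :: t).length = k := hrk hre
      rw [pvSMid cap jn re en n k (y2 :: t) rest (i + 1) (if cap then false else true)
        (by simp) hnc hre
        (by
          have heq : i + 1 + (y2 :: t).length = i + k := by simp at hkl ⊢; omega
          rw [heq]; exact Nat.dvd_add hdvd dvd_rfl)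
        (by simp at hsum ⊢; omega) hnd]
      have hlen2 : i + 1 + (y2 :: t).length = i + (x :: y2 :: t).length := by simp; omega
      rw [hlen2]
      simp only [if_neg hre, hcap]
      rw [pvSJoinConsCons]
      simp only [pvSAssoc]

theorem pvMain (cap : Bool) (jn re en : String) (n k : Nat) (hk : k ≠ 0) :
    ∀ (m : Nat) (rest : List String) (i : Nat), rest.length = m → rest ≠ [] → k ∣ i →
    i + rest.length = n →
    pvAuxA cap jn re en n k rest i true
      = PySem.Str.join re ((pvRows k rest).map (fun row => PySem.Str.join jn (pvCap cap row))) ++ en := by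
  intro m
  induction m using Nat.strong_induction_on with
  | _ m IH =>
    intro rest i hm hne hdvd hsum
    obtain ⟨x, xs, rfl⟩ : ∃ x xs, rest = x :: xs := by
      cases rest with
      | nil => exact absurd rfl hne
      | cons a b => exact ⟨a, b, rfl⟩
    obtain ⟨k', rfl⟩ : ∃ k', k = k' + 1 := ⟨k - 1, by omega⟩
    have hdropeq : xs.drop (k' + 1 - 1) = (x :: xs).drop (k' + 1) := by simp
    have hrows : pvRows (k' + 1) (x :: xs)
        = (x :: xs).take (k' + 1) :: pvRows (k' + 1) ((x :: xs).drop (k' + 1)) := by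
      rw [pvRows, hdropeq]
    have hsplit : (x :: xs).take (k' + 1) ++ (x :: xs).drop (k' + 1) = x :: xs :=
      List.take_append_drop _ _
    have hrow_ne : (x :: xs).take (k' + 1) ≠ [] := by simp
    have hrow_len : ((x :: xs).take (k' + 1)).length ≤ k' + 1 := by
      simp [List.length_take]
    have hrk : (x :: xs).drop (k' + 1) ≠ [] → ((x :: xs).take (k' + 1)).length = k' + 1 := by
      intro hd
      have h2 : ¬ ((x :: xs).length ≤ k' + 1) := fun hle => hd (List.drop_eq_nil_of_le hle)
      simp only [List.length_take, List.length_cons] at h2 ⊢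
      omega
    have hlensplit : ((x :: xs).take (k' + 1)).length + ((x :: xs).drop (k' + 1)).length
        = (x :: xs).length := by
      rw [← List.length_append, hsplit]
    have hsum' : i + ((x :: xs).take (k' + 1)).length + ((x :: xs).drop (k' + 1)).length = n := by
      omega
    have hA := pvRowStep cap jn re en n (k' + 1) ((x :: xs).take (k' + 1))
      ((x :: xs).drop (k' + 1)) i hrow_ne hrow_len hdvd hsum' hrk
    rw [hsplit] at hA
    rw [hA, hrows]
    by_cases hre : (x :: xs).drop (k' + 1) = []
    · rw [hre]
      simp only [pvRows, List.map_cons, List.map_nil, if_pos rfl]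
      rw [pvSJoinSingleton]
      simp
    · have hlt : ((x :: xs).drop (k' + 1)).length < m := by
        subst hm; simp
      have hdvd' : (k' + 1) ∣ (i + ((x :: xs).take (k' + 1)).length) := by
        rw [hrk hre]; exact Nat.dvd_add hdvd dvd_rfl
      rw [if_neg hre,
        IH _ hlt ((x :: xs).drop (k' + 1)) (i + ((x :: xs).take (k' + 1)).length) rfl hre hdvd'
          (by omega)]
      obtain ⟨z, zs, hz⟩ : ∃ z zs, (x :: xs).drop (k' + 1) = z :: zs := by
        cases hzz : (x :: xs).drop (k' + 1) with
        | nil => exact absurd hzz hre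
        | cons a b => exact ⟨a, b, rfl⟩
      rw [hz, pvRows]
      simp only [List.map_cons]
      rw [pvSJoinConsCons]
      simp only [pvSAssoc]

-- ===== VERDICT (by name: the statement is the Claim_ definition above) =====
theorem wrap_text_block_spec : Claim_equal_wrap_text_block := by
  intro l e cap jn re en hdom hpre
  unfold Spec_wrap_text_block
  obtain ⟨hpre1, _⟩ := hpre
  by_cases hl : l = []
  · subst hl
    simp [wrap_text_block, wrap_text_block_alt, PySem.List.enumerate_nil]
  · have he1 : 1 ≤ e := hpre1.resolve_left hl
    have he : e ≠ 0 := by omega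
    have htn : e.toNat = e.natAbs := by omega
    have hk : e.natAbs ≠ 0 := fun h0 => he (Int.natAbs_eq_zero.mp h0)
    have hA : wrap_text_block l e cap jn re en
        = pvAuxA cap jn re en l.length e.natAbs l 0 true := by
      unfold wrap_text_block
      have hF := pvFoldA l e cap jn re en he l 0 "" true (by simp)
      simpa using hF
    have hB : wrap_text_block_alt l e cap jn re en
        = PySem.Str.join re
            ((pvRows e.natAbs l).map (fun row => PySem.Str.join jn (pvCap cap row))) ++ en := by
      simp only [wrap_text_block_alt, if_neg hl, htn]
      rw [pvChunks_eq e.natAbs hk [] l]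
      simp only [List.nil_append]
      congr 1
      cases cap with
      | false => simp [pvCap]
      | true => simp [pvCap, List.map_map, Function.comp_def]
    rw [hA, hB]
    exact pvMain cap jn re en l.length e.natAbs hk l.length l 0 rfl hl (Nat.dvd_zero _)
      (by omega)
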